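-- pv_equiv track=rewrite | github.com/jschw/LMRunner | src/lmrunner/lm_runner.py | format_model_list
-- ===== SOURCE A (Python) =====
-- def _render_table(headers, rows, title=None):
--     columns = len(headers)
--     widths = [len(h) for h in headers]
--     for row in rows:
--         for i in range(columns):
--             cell = str(row[i]) if i < len(row) else ""
--             widths[i] = max(widths[i], len(cell))
--
--     def format_row(values):
--         padded = [str(values[i]).ljust(widths[i]) for i in range(columns)]
--         return "| " + " | ".join(padded) + " |"
--
--     separator = "| " + " | ".join("-" * w for w in widths) + " |"
--     lines = []
--     if title:
--         lines.append(title)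
--     lines.append(format_row(headers))
--     lines.append(separator)
--     for row in rows:
--         row_values = [row[i] if i < len(row) else "" for i in range(columns)]
--         lines.append(format_row(row_values))
--     return "\n".join(lines)
--
-- def format_model_list(avail_models):
--     headers = ["Model name", "Port", "Path", "HF Repo", "HF Repo File"]
--     rows = []
--     for model in avail_models:
--         rows.append([
--             model.get("name", ""),
--             model.get("port", ""),
--             model.get("model", ""),
--             model.get("hf-repo", ""),
--             model.get("hf-file", ""),
--         ])
--     return _render_table(headers, rows, title="Available LLM models:")
-- ===== SOURCE B (Python) =====
-- def format_model_list(avail_models):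
--     # Column-strip rendering: append one padded column at a time to every output line.
--     lines = ["|"] * (len(avail_models) + 2)
--     for header, key in [("Model name", "name"), ("Port", "port"), ("Path", "model"),
--                         ("HF Repo", "hf-repo"), ("HF Repo File", "hf-file")]:
--         cells = [str(m.get(key, "")) for m in avail_models]
--         w = max([len(header)] + [len(c) for c in cells])
--         strip = [header.ljust(w), "-" * w] + [c.ljust(w) for c in cells]
--         lines = [line + " " + cell + " |" for line, cell in zip(lines, strip)]
--     return "\n".join(["Available LLM models:"] + lines)
-- ===== Notes on version B (the rewrite author's own statement) =====
-- stated objective: alternative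
-- what changed: B renders the table column by column: starting from a list of bare '|' line stubs it folds over the five (header,key) columns, computing each column's width and padded vertical strip and appending ' cell |' to every output line, instead of A's row-major pipeline (collect rows, running-max widths per row, then format each row with a join).
import Mathlib
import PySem

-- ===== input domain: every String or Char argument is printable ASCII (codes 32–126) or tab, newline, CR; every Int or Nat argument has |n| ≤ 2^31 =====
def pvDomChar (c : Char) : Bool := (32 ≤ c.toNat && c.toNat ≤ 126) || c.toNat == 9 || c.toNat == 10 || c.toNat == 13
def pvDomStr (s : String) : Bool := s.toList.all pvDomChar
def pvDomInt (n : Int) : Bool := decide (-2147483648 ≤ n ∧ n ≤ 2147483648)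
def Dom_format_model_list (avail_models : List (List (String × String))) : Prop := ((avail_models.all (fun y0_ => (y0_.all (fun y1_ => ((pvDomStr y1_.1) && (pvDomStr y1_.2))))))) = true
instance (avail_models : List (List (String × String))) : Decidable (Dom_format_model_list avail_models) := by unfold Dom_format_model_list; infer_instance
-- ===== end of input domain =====

-- B renders the table column by column (a fold over the five columns appending a padded
-- vertical strip to every output line) instead of A's row-major rendering; objective: alternative.

-- shared Python primitives: dict.get(k, ""), str.ljust, len
def pvGet (m : List (String × String)) (k : String) : String :=
  (PySem.Dict.ofList m).getD k ""

def pvLen (s : String) : Nat := s.toList.length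

def pvLjust (s : String) (w : Nat) : String :=
  String.ofList (s.toList ++ List.replicate (w - pvLen s) ' ')

def pvDash (w : Nat) : String := String.ofList (List.replicate w '-')

-- ===== PORT A =====
def format_model_list (avail_models : List (List (String × String))) : String :=
  let headers := ["Model name", "Port", "Path", "HF Repo", "HF Repo File"]
  let rows := avail_models.foldl (fun acc model =>
    acc ++ [[pvGet model "name", pvGet model "port", pvGet model "model",
             pvGet model "hf-repo", pvGet model "hf-file"]]) []
  -- _render_table headers rows (title := "Available LLM models:")
  let columns := headers.length
  let widths0 := headers.map pvLen
  let widths := rows.foldl (fun ws row =>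
      (List.range columns).foldl (fun ws i =>
        let cell := row.getD i ""           -- str(row[i]) if i < len(row) else ""
        ws.set i (max (ws.getD i 0) (pvLen cell))) ws) widths0
  let formatRow := fun (values : List String) =>
      let padded := (List.range columns).map (fun i => pvLjust (values.getD i "") (widths.getD i 0))
      "| " ++ PySem.Str.join " | " padded ++ " |"
  let separator := "| " ++ PySem.Str.join " | " (widths.map pvDash) ++ " |"
  let lines := ["Available LLM models:"]
  let lines := lines ++ [formatRow headers]
  let lines := lines ++ [separator]
  let lines := rows.foldl (fun acc row =>
      acc ++ [formatRow ((List.range columns).map (fun i => row.getD i ""))]) lines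
  PySem.Str.join "\n" lines

-- ===== PORT B =====
def format_model_list_alt (avail_models : List (List (String × String))) : String :=
  let lines := List.replicate (avail_models.length + 2) "|"
  let lines := ([("Model name", "name"), ("Port", "port"), ("Path", "model"),
                 ("HF Repo", "hf-repo"), ("HF Repo File", "hf-file")]).foldl
    (fun lines hk =>
      let cells := avail_models.map (fun m => pvGet m hk.2)
      let w := (cells.map pvLen).foldl max (pvLen hk.1)
      let strip := [pvLjust hk.1 w, pvDash w] ++ cells.map (fun c => pvLjust c w)
      (lines.zip strip).map (fun p => p.1 ++ " " ++ p.2 ++ " |")) lines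
  PySem.Str.join "\n" ("Available LLM models:" :: lines)

-- ===== PRECONDITION & SPEC =====
def Spec_format_model_list (avail_models : List (List (String × String))) (out : String) : Prop := out = format_model_list_alt avail_models
instance (avail_models : List (List (String × String))) (out : String) : Decidable (Spec_format_model_list avail_models out) := by unfold Spec_format_model_list; infer_instance

-- ===== CLAIM (what is proved, stated in full; the proofs are below) =====
def Claim_equal_format_model_list : Prop := ∀ (avail_models : List (List (String × String))), Dom_format_model_list avail_models → Spec_format_model_list avail_models (format_model_list avail_models)

-- ===== LEMMAS AND PROOFS =====

def pvRow (m : List (String × String)) : List String :=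
  [pvGet m "name", pvGet m "port", pvGet m "model", pvGet m "hf-repo", pvGet m "hf-file"]

def pvW (k : String) (ms : List (List (String × String))) (init : Nat) : Nat :=
  ms.foldl (fun acc m => max acc (pvLen (pvGet m k))) init

-- one column-append step of B
def pvZm (L strip : List String) : List String :=
  (L.zip strip).map (fun p => p.1 ++ " " ++ p.2 ++ " |")

lemma pvZm_cons (a x : String) (L xs : List String) :
    pvZm (a :: L) (x :: xs) = (a ++ " " ++ x ++ " |") :: pvZm L xs := by
  simp [pvZm]

lemma pvLine5 (a b c d e : String) :
    (((((("|" : String) ++ " " ++ a ++ " |") ++ " " ++ b ++ " |") ++ " " ++ c ++ " |")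
        ++ " " ++ d ++ " |") ++ " " ++ e ++ " |") =
    "| " ++ PySem.Str.join " | " [a, b, c, d, e] ++ " |" := by
  apply String.toList_inj.mp
  simp [String.toList_append, PySem.Str.join, PySem.Chars.join, List.intercalate, List.intersperse]

lemma pvA_widths (ms : List (List (String × String))) :
    ∀ a b c d e : Nat,
    (ms.map pvRow).foldl (fun ws row =>
        (List.range 5).foldl (fun ws i =>
          ws.set i (max (ws.getD i 0) (pvLen (row.getD i "")))) ws) [a, b, c, d, e] =
      [pvW "name" ms a, pvW "port" ms b, pvW "model" ms c,
       pvW "hf-repo" ms d, pvW "hf-file" ms e] := by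
  induction ms with
  | nil => intro a b c d e; simp [pvW]
  | cons m ms ih =>
      intro a b c d e
      have hstep : (List.range 5).foldl (fun ws i =>
          ws.set i (max (ws.getD i 0) (pvLen ((pvRow m).getD i "")))) [a, b, c, d, e] =
          [max a (pvLen (pvGet m "name")), max b (pvLen (pvGet m "port")),
           max c (pvLen (pvGet m "model")), max d (pvLen (pvGet m "hf-repo")),
           max e (pvLen (pvGet m "hf-file"))] := rfl
      simp only [List.map_cons, List.foldl_cons]
      rw [hstep, ih]
      simp [pvW]

lemma pvB_width (ms : List (List (String × String))) (k : String) (init : Nat) :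
    ((ms.map (fun m => pvGet m k)).map pvLen).foldl max init = pvW k ms init := by
  simp [List.foldl_map, pvW]

-- the tail of B's fold (rows below header and separator), with arbitrary fixed widths
lemma pvTail5 (ms : List (List (String × String))) :
    ∀ w1 w2 w3 w4 w5 : Nat,
    pvZm (pvZm (pvZm (pvZm (pvZm (List.replicate ms.length "|")
        (ms.map (fun m => pvLjust (pvGet m "name") w1)))
        (ms.map (fun m => pvLjust (pvGet m "port") w2)))
        (ms.map (fun m => pvLjust (pvGet m "model") w3)))
        (ms.map (fun m => pvLjust (pvGet m "hf-repo") w4)))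
        (ms.map (fun m => pvLjust (pvGet m "hf-file") w5)) =
      ms.map (fun m => "| " ++ PySem.Str.join " | "
        [pvLjust (pvGet m "name") w1, pvLjust (pvGet m "port") w2,
         pvLjust (pvGet m "model") w3, pvLjust (pvGet m "hf-repo") w4,
         pvLjust (pvGet m "hf-file") w5] ++ " |") := by
  induction ms with
  | nil => intro _ _ _ _ _; simp [pvZm]
  | cons m ms ih =>
      intro w1 w2 w3 w4 w5
      simp only [List.map_cons, List.length_cons, List.replicate_succ, pvZm_cons, ih]
      rw [pvLine5]

lemma pvZm_eq (L strip : List String) :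
    (L.zip strip).map (fun p => p.1 ++ " " ++ p.2 ++ " |") = pvZm L strip := rfl

theorem pv_main (ms : List (List (String × String))) :
    format_model_list ms = format_model_list_alt ms := by
  unfold format_model_list format_model_list_alt
  simp only [PySem.List.foldl_append_singleton_eq_map, List.nil_append]
  rw [show (fun model : List (String × String) =>
        [pvGet model "name", pvGet model "port", pvGet model "model",
         pvGet model "hf-repo", pvGet model "hf-file"]) = pvRow from rfl]
  rw [show (["Model name", "Port", "Path", "HF Repo", "HF Repo File"] : List String).length = 5 from rfl]
  rw [show List.map pvLen ["Model name", "Port", "Path", "HF Repo", "HF Repo File"] =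
        [pvLen "Model name", pvLen "Port", pvLen "Path", pvLen "HF Repo", pvLen "HF Repo File"] from rfl]
  rw [pvA_widths]
  simp only [List.foldl_cons, List.foldl_nil, pvZm_eq, pvB_width]
  refine congrArg _ ?_
  generalize pvW "name" ms (pvLen "Model name") = W1
  generalize pvW "port" ms (pvLen "Port") = W2
  generalize pvW "model" ms (pvLen "Path") = W3
  generalize pvW "hf-repo" ms (pvLen "HF Repo") = W4
  generalize pvW "hf-file" ms (pvLen "HF Repo File") = W5
  rw [show ms.length + 2 = (ms.length + 1) + 1 from rfl]
  simp only [List.replicate_succ, List.cons_append, List.nil_append, pvZm_cons,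
    pvLine5, show List.range 5 = [0,1,2,3,4] from rfl, List.map_cons, List.map_nil,
    List.getD_cons_zero, List.getD_cons_succ, List.map_map]
  simp only [Function.comp_def]
  rw [pvTail5]
  refine congrArg _ (congrArg _ (congrArg _ ?_))
  refine List.map_congr_left ?_
  intro m _
  simp [pvRow]

-- ===== VERDICT (by name: the statement is the Claim_ definition above) =====
theorem format_model_list_spec : Claim_equal_format_model_list := by
  intro ms _
  exact pv_main ms
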